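-- pv_equiv track=rewrite | github.com/p0s/the-mind | scripts/normalize_source_formats.py | parse_notes_kv
-- ===== SOURCE A (Python) =====
-- from typing import Dict, List, Optional, Tuple
--
-- def parse_notes_kv(notes: str) -> Dict[str, str]:
--     out: Dict[str, str] = {}
--     for tok in (notes or "").split():
--         if "=" not in tok:
--             continue
--         k, v = tok.split("=", 1)
--         k = k.strip()
--         v = v.strip()
--         if k and v:
--             out[k] = v
--     return out
-- ===== SOURCE B (Python) =====
-- def parse_notes_kv(notes):
--     # Single character-level scan: no intermediate token list, no per-token re-splitting.
--     out = {}
--     key, buf = None, ""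
--     for ch in notes or "":
--         if ch.isspace():
--             if key and buf:
--                 out[key] = buf
--             key, buf = None, ""
--         elif ch == "=" and key is None:
--             key, buf = buf, ""
--         else:
--             buf += ch
--     if key and buf:
--         out[key] = buf
--     return out
-- ===== Notes on version B (the rewrite author's own statement) =====
-- stated objective: alternative
-- what changed: A tokenizes with str.split() and then re-splits each token at its first equals sign; B is a single character-level state machine that scans the string once, accumulating (key, buf) and flushing on whitespace, so it builds no intermediate token list and does no per-token second split.
import Mathlib
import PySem

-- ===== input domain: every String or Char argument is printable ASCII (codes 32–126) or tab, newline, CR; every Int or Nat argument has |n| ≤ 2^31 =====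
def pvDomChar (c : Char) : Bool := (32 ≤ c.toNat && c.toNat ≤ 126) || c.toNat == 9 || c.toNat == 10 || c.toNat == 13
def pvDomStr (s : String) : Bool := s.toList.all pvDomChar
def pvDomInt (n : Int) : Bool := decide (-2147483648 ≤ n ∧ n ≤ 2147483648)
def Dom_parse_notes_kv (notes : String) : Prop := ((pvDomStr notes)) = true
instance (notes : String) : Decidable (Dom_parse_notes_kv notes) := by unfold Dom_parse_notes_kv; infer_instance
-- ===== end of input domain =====

-- B replaces A's split-into-tokens-then-split-each-token-again loop by one character-level
-- state-machine pass over the string (objective: alternative single-pass algorithm, same cost).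

-- ===== PORT A =====
-- A (Source A): for tok in notes.split(): if "=" in tok: k, v = tok.split("=", 1); strip; if k and v: out[k] = v
-- ported on the List Char side (PySem.Str.* are thin wrappers over PySem.Chars.* on s.toList);
-- '(notes or "")' equals notes for strings.  The per-token body of A's loop:
def pvAStep (d : PySem.Dict (List Char) (List Char)) (tok : List Char) :
    PySem.Dict (List Char) (List Char) :=
  if PySem.Chars.isIn ['='] tok then          -- if "=" in tok
    match PySem.Chars.splitMax? tok ['='] 1 with   -- k, v = tok.split("=", 1)
    | some (k :: v :: _) =>
        let k := PySem.Chars.strip k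
        let v := PySem.Chars.strip v
        if k ≠ [] ∧ v ≠ [] then d.insert k v else d
    | _ => d                                   -- unreachable: "=" ∈ tok gives exactly two parts
  else d

def parse_notes_kv (notes : String) : List (String × String) :=
  (((PySem.Chars.split₀ notes.toList).foldl pvAStep PySem.Dict.empty).items).map
    (fun p => (String.ofList p.1, String.ofList p.2))

-- ===== PORT B =====
-- B (Source B): one pass over the characters with state (out, key, buf); a whitespace flushes,
-- the FIRST '=' of a token moves buf into key, everything else extends buf.
-- 'if key and buf: out[key] = buf'  (key truthy = not None and nonempty):
def pvFlush (d : PySem.Dict (List Char) (List Char)) (key : Option (List Char))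
    (buf : List Char) : PySem.Dict (List Char) (List Char) :=
  match key with
  | some k => if k ≠ [] ∧ buf ≠ [] then d.insert k buf else d
  | none => d

def pvStep (s : PySem.Dict (List Char) (List Char) × Option (List Char) × List Char)
    (c : Char) : PySem.Dict (List Char) (List Char) × Option (List Char) × List Char :=
  if PySem.Chars.isspace c then (pvFlush s.1 s.2.1 s.2.2, none, [])
  else if c == '=' && s.2.1.isNone then (s.1, some s.2.2, [])
  else (s.1, s.2.1, s.2.2 ++ [c])

def pvFinal (s : PySem.Dict (List Char) (List Char) × Option (List Char) × List Char) :
    PySem.Dict (List Char) (List Char) :=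
  pvFlush s.1 s.2.1 s.2.2

def parse_notes_kv_alt (notes : String) : List (String × String) :=
  ((pvFinal (notes.toList.foldl pvStep (PySem.Dict.empty, none, []))).items).map
    (fun p => (String.ofList p.1, String.ofList p.2))

-- ===== PRECONDITION & SPEC =====
def Spec_parse_notes_kv (notes : String) (out : List (String × String)) : Prop := out = parse_notes_kv_alt notes
instance (notes : String) (out : List (String × String)) : Decidable (Spec_parse_notes_kv notes out) := by unfold Spec_parse_notes_kv; infer_instance

-- ===== CLAIM (what is proved, stated in full; the proofs are below) =====
def Claim_equal_parse_notes_kv : Prop := ∀ (notes : String), Dom_parse_notes_kv notes → Spec_parse_notes_kv notes (parse_notes_kv notes)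

-- ===== LEMMAS AND PROOFS =====

-- the token B's machine state (key, buf) has read so far
def pvTok (key : Option (List Char)) (buf : List Char) : List Char :=
  match key with
  | none => buf
  | some k => k ++ '=' :: buf

-- machine-state invariant: no whitespace in the partial token; no '=' before the first '='
def pvInv (key : Option (List Char)) (buf : List Char) : Prop :=
  (∀ c ∈ pvTok key buf, PySem.Chars.isspace c = false) ∧
  (∀ k, key = some k → '=' ∉ k) ∧ (key = none → '=' ∉ buf)

theorem pv_strip_id (l : List Char) (h : ∀ c ∈ l, PySem.Chars.isspace c = false) :
    PySem.Chars.strip l = l := by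
  have h1 : PySem.Chars.lstrip l = l := by
    cases l with
    | nil => rfl
    | cons a t => simp [PySem.Chars.lstrip, List.dropWhile, h a (by simp)]
  have h2 : PySem.Chars.rstrip l = l := by
    unfold PySem.Chars.rstrip
    rw [List.dropWhile_eq_self_iff.mpr ?_, List.reverse_reverse]
    intro hne
    simp only [Bool.not_eq_true]
    exact h (l.reverse[0]) (List.mem_reverse.mp (l.reverse.getElem_mem hne))
  unfold PySem.Chars.strip
  rw [h1, h2]

theorem pv_go_m0 (l : List Char) (fuel : Nat) (cur : List Char) (acc : List (List Char))
    (h : l.length < fuel) :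
    PySem.Chars.splitOnMax.go ['='] fuel 0 l cur acc = acc.reverse ++ [cur.reverse ++ l] := by
  cases fuel with
  | zero => omega
  | succ f =>
    cases l with
    | nil => simp [PySem.Chars.splitOnMax.go]
    | cons c rest => simp [PySem.Chars.splitOnMax.go]

theorem pv_go_m1 (l : List Char) : ∀ (fuel : Nat) (cur : List Char) (acc : List (List Char)),
    l.length < fuel →
    PySem.Chars.splitOnMax.go ['='] fuel 1 l cur acc =
      acc.reverse ++ (if '=' ∈ l then
        [cur.reverse ++ l.takeWhile (· ≠ '='), (l.dropWhile (· ≠ '=')).tail]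
      else [cur.reverse ++ l]) := by
  induction l with
  | nil =>
    intro fuel cur acc h
    cases fuel with
    | zero => omega
    | succ f => simp [PySem.Chars.splitOnMax.go]
  | cons c rest ih =>
    intro fuel cur acc h
    cases fuel with
    | zero => omega
    | succ f =>
      by_cases hc : c = '='
      · subst hc
        rw [show PySem.Chars.splitOnMax.go ['='] (f + 1) 1 ('=' :: rest) cur acc =
            PySem.Chars.splitOnMax.go ['='] f 0 rest [] (cur.reverse :: acc) from by
          simp [PySem.Chars.splitOnMax.go, List.isPrefixOf]]
        rw [pv_go_m0 rest f [] (cur.reverse :: acc) (by simpa using Nat.lt_of_succ_lt_succ h)]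
        simp [List.takeWhile, List.dropWhile]
      · have hc' : ¬ ('=' = c) := fun h => hc h.symm
        rw [show PySem.Chars.splitOnMax.go ['='] (f + 1) 1 (c :: rest) cur acc =
            PySem.Chars.splitOnMax.go ['='] f 1 rest (c :: cur) acc from by
          simp [PySem.Chars.splitOnMax.go, List.isPrefixOf, hc']]
        rw [ih f (c :: cur) acc (by simpa using Nat.lt_of_succ_lt_succ h)]
        by_cases hm : '=' ∈ rest <;>
          simp [hc, hc', hm]

theorem pv_splitMax_eq (t : List Char) (h : '=' ∈ t) :
    PySem.Chars.splitMax? t ['='] 1 =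
      some [t.takeWhile (· ≠ '='), (t.dropWhile (· ≠ '=')).tail] := by
  unfold PySem.Chars.splitMax? PySem.Chars.splitOnMax
  rw [if_neg (by simp), if_neg (by omega)]
  simp only [Int.toNat_one]
  rw [pv_go_m1 t (t.length + 1) [] [] (by omega)]
  simp [h]

theorem pv_isIn_eq (t : List Char) : PySem.Chars.isIn ['='] t = decide ('=' ∈ t) := by
  by_cases h : '=' ∈ t
  · simp [h, (PySem.Chars.isIn_iff_infix ['='] t).mpr ((List.singleton_infix_iff '=' t).mpr h)]
  · simp only [h, decide_false]
    rw [PySem.Chars.isIn_eq_false_iff ['='] t]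
    intro hinf
    exact h ((List.singleton_infix_iff '=' t).mp hinf)

-- splitting k ++ '=' :: buf at the first '=' when k has none
theorem pv_take_drop (k buf : List Char) (hk : '=' ∉ k) :
    (k ++ '=' :: buf).takeWhile (· ≠ '=') = k ∧
    (k ++ '=' :: buf).dropWhile (· ≠ '=') = '=' :: buf := by
  induction k with
  | nil => simp
  | cons a t ih =>
    have ha : ¬ a = '=' := fun h => hk (by simp [h])
    have ht := ih (fun h => hk (by simp [h]))
    rw [List.cons_append, List.takeWhile_cons, List.dropWhile_cons, if_pos (by simpa using ha),
      if_pos (by simpa using ha), ht.1, ht.2]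
    exact ⟨rfl, rfl⟩

-- on a token B's machine has assembled, A's per-token action is exactly B's flush
theorem pv_step_tok (d : PySem.Dict (List Char) (List Char)) (key : Option (List Char))
    (buf : List Char) (hinv : pvInv key buf) :
    pvAStep d (pvTok key buf) = pvFlush d key buf := by
  obtain ⟨hws, hkeq, hbeq⟩ := hinv
  cases key with
  | none =>
    have : '=' ∉ buf := hbeq rfl
    simp [pvAStep, pvFlush, pvTok, pv_isIn_eq, this]
  | some k =>
    have hk : '=' ∉ k := hkeq k rfl
    have hmem : '=' ∈ pvTok (some k) buf := by simp [pvTok]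
    rw [pvAStep, pv_isIn_eq, if_pos (by simpa using hmem), pv_splitMax_eq _ hmem]
    have htd := pv_take_drop k buf hk
    simp only [pvTok] at htd ⊢
    rw [htd.1, htd.2]
    have hsk : PySem.Chars.strip k = k :=
      pv_strip_id k (fun c hc => hws c (by simp [pvTok, hc]))
    have hsb : PySem.Chars.strip buf = buf :=
      pv_strip_id buf (fun c hc => hws c (by simp [pvTok, hc]))
    simp only [List.tail_cons, hsk, hsb, pvFlush]

theorem pv_go_acc (cs : List Char) : ∀ (cur : List Char) (acc : List (List Char)),
    PySem.Chars.split₀.go cs cur acc = acc.reverse ++ PySem.Chars.split₀.go cs cur [] := by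
  induction cs with
  | nil =>
    intro cur acc
    by_cases h : cur.isEmpty <;> simp [PySem.Chars.split₀.go, h]
  | cons c rest ih =>
    intro cur acc
    by_cases hs : PySem.Chars.isspace c
    · by_cases h : cur.isEmpty
      · simp [PySem.Chars.split₀.go, hs, h]
        exact ih [] acc
      · simp only [PySem.Chars.split₀.go, hs, h, if_true, if_false, Bool.false_eq_true]
        rw [ih [] (cur.reverse :: acc), ih [] [cur.reverse]]
        simp
    · simp only [PySem.Chars.split₀.go, hs, Bool.false_eq_true, if_false]
      exact ih (c :: cur) acc

theorem pv_main (cs : List Char) :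
    ∀ (d : PySem.Dict (List Char) (List Char)) (key : Option (List Char)) (buf : List Char),
    pvInv key buf →
    pvFinal (cs.foldl pvStep (d, key, buf)) =
      (PySem.Chars.split₀.go cs (pvTok key buf).reverse []).foldl pvAStep d := by
  induction cs with
  | nil =>
    intro d key buf hinv
    by_cases h : pvTok key buf = []
    · have hk : key = none := by
        cases key with
        | none => rfl
        | some k => simp [pvTok] at h
      have hb : buf = [] := by simpa [pvTok, hk] using h
      simp [pvFinal, pvFlush, hk, hb, PySem.Chars.split₀.go, pvTok]
    · rw [show PySem.Chars.split₀.go [] (pvTok key buf).reverse [] = [pvTok key buf] from by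
        simp [PySem.Chars.split₀.go, h]]
      simp [List.foldl, pvFinal, pv_step_tok d key buf hinv]
  | cons c rest ih =>
    intro d key buf hinv
    by_cases hs : PySem.Chars.isspace c
    · rw [show (c :: rest).foldl pvStep (d, key, buf) =
          rest.foldl pvStep (pvFlush d key buf, none, []) from by simp [List.foldl, pvStep, hs]]
      rw [ih (pvFlush d key buf) none [] ⟨by simp [pvTok], by simp, by simp⟩]
      by_cases h : pvTok key buf = []
      · have hk : key = none := by
          cases key with
          | none => rfl
          | some k => simp [pvTok] at h
        have hb : buf = [] := by simpa [pvTok, hk] using h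
        simp [PySem.Chars.split₀.go, hs, hk, hb, pvFlush, pvTok]
      · rw [show PySem.Chars.split₀.go (c :: rest) (pvTok key buf).reverse [] =
            PySem.Chars.split₀.go rest [] [pvTok key buf] from by
          simp [PySem.Chars.split₀.go, hs, h]]
        rw [pv_go_acc rest [] [pvTok key buf]]
        simp only [List.reverse_cons, List.reverse_nil, List.nil_append, List.foldl_append,
          List.foldl_cons, List.foldl_nil]
        rw [pv_step_tok d key buf hinv]
        simp [pvTok]
    · obtain ⟨hws, hkeq, hbeq⟩ := hinv
      have hgo : PySem.Chars.split₀.go (c :: rest) (pvTok key buf).reverse [] =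
          PySem.Chars.split₀.go rest (c :: (pvTok key buf).reverse) [] := by
        simp [PySem.Chars.split₀.go, hs]
      by_cases hc : c = '=' ∧ key = none
      · obtain ⟨hc, hk⟩ := hc
        subst hc; subst hk
        rw [show (('=') :: rest).foldl pvStep (d, none, buf) =
            rest.foldl pvStep (d, some buf, []) from by simp [List.foldl, pvStep, hs]]
        rw [ih d (some buf) [] ?_, hgo]
        · simp [pvTok]
        · refine ⟨?_, by intro k hk; cases hk; exact hbeq rfl, by simp⟩
          intro x hx
          simp only [pvTok] at hx hws ⊢
          rcases List.mem_append.mp hx with h1 | h1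
          · exact hws x h1
          · rcases List.mem_cons.mp h1 with h2 | h2
            · subst h2; decide
            · simp at h2
      · have hstep : pvStep (d, key, buf) c = (d, key, buf ++ [c]) := by
          simp only [pvStep, hs, Bool.false_eq_true, if_false]
          rw [if_neg]
          simp only [Bool.and_eq_true, beq_iff_eq, Option.isNone_iff_eq_none]
          rintro ⟨h1, h2⟩
          exact hc ⟨h1, h2⟩
        rw [show (c :: rest).foldl pvStep (d, key, buf) =
            rest.foldl pvStep (d, key, buf ++ [c]) from by simp [List.foldl, hstep]]
        have htok : pvTok key (buf ++ [c]) = pvTok key buf ++ [c] := by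
          cases key <;> simp [pvTok]
        rw [ih d key (buf ++ [c]) ?_, hgo, htok]
        · simp
        · refine ⟨?_, hkeq, ?_⟩
          · intro x hx
            rw [htok] at hx
            rcases List.mem_append.mp hx with h1 | h1
            · exact hws x h1
            · simp at h1; subst h1; exact eq_false_of_ne_true hs
          · intro hk
            subst hk
            simp only [List.mem_append, List.mem_singleton]
            rintro (h1 | h1)
            · exact hbeq rfl h1
            · exact hc ⟨h1.symm, rfl⟩

-- ===== VERDICT (by name: the statement is the Claim_ definition above) =====
theorem parse_notes_kv_spec : Claim_equal_parse_notes_kv := by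
  intro notes _
  unfold Spec_parse_notes_kv parse_notes_kv parse_notes_kv_alt
  rw [pv_main notes.toList PySem.Dict.empty none [] ⟨by simp [pvTok], by simp, by simp⟩]
  rfl
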